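-- pv_equiv track=rewrite | github.com/PhilippRisius/nbgrader-jupyterquiz | src/nbgrader_jupyterquiz/grader/parse.py | find_quiz_regions
-- ===== SOURCE A (Python) =====
-- def find_quiz_regions(
--     source: str,
--     begin_quiz_delimiter: str = "#### Quiz",
--     end_quiz_delimiter: str = "#### End Quiz",
-- ) -> tuple[list[tuple[str, list[str]]], list[str]]:
--     """
--     Extract regions within quiz delimiters.
--
--     Parameters
--     ----------
--     source : str
--         Full source text of the markdown cell.
--     begin_quiz_delimiter : str, optional
--         Marker that opens a quiz region.
--     end_quiz_delimiter : str, optional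
--         Marker that closes a quiz region.
--
--     Returns
--     -------
--     quizzes : list[tuple[str, list[str]]]
--         Each entry is ``(options_header, quiz_lines)``.
--     remaining_lines : list[str]
--         Lines that fall outside any quiz region.
--     """
--     quizzes: list[tuple[str, list[str]]] = []
--     remaining_lines: list[str] = []
--     quiz_options = ""
--     quiz_lines: list[str] = []
--     in_quiz_region = False
--
--     for line in source.split("\n"):
--         if line.strip().startswith(begin_quiz_delimiter):
--             if in_quiz_region:
--                 raise RuntimeError("Encountered nested quiz delimiters")
--             in_quiz_region = True
--             quiz_options = line.strip().removeprefix(begin_quiz_delimiter)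
--             quiz_lines = []
--
--         elif line.strip().startswith(end_quiz_delimiter):
--             if not in_quiz_region:
--                 raise RuntimeError("Encountered quiz end without beginning")
--             in_quiz_region = False
--             quizzes.append((quiz_options, quiz_lines))
--
--         elif in_quiz_region:
--             quiz_lines.append(line)
--
--         else:
--             remaining_lines.append(line)
--
--     if in_quiz_region:
--         raise RuntimeError(f"Cell ended without {end_quiz_delimiter = }")
--
--     return quizzes, remaining_lines
-- ===== SOURCE B (Python) =====
-- def find_quiz_regions(
--     source: str,
--     begin_quiz_delimiter: str = "#### Quiz",
--     end_quiz_delimiter: str = "#### End Quiz",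
-- ) -> tuple[list[tuple[str, list[str]]], list[str]]:
--     """Nested-loop consumption of an iterator instead of a boolean region flag."""
--     quizzes: list[tuple[str, list[str]]] = []
--     remaining_lines: list[str] = []
--     it = iter(source.split("\n"))
--     for line in it:
--         stripped = line.strip()
--         if stripped.startswith(begin_quiz_delimiter):
--             options = stripped.removeprefix(begin_quiz_delimiter)
--             body: list[str] = []
--             for inner in it:
--                 t = inner.strip()
--                 if t.startswith(begin_quiz_delimiter):
--                     raise RuntimeError("Encountered nested quiz delimiters")
--                 if t.startswith(end_quiz_delimiter):
--                     break
--                 body.append(inner)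
--             else:
--                 raise RuntimeError(f"Cell ended without {end_quiz_delimiter = }")
--             quizzes.append((options, body))
--         elif stripped.startswith(end_quiz_delimiter):
--             raise RuntimeError("Encountered quiz end without beginning")
--         else:
--             remaining_lines.append(line)
--     return quizzes, remaining_lines
-- ===== Notes on version B (the rewrite author's own statement) =====
-- stated objective: alternative
-- what changed: Replaced the single flat loop with an in_quiz_region boolean flag by an outer loop over a shared line iterator whose begin-branch runs an inner loop that consumes the quiz body until the end delimiter (for/else for the unterminated case), so no mode flag or cross-iteration quiz state exists.
import Mathlib
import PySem

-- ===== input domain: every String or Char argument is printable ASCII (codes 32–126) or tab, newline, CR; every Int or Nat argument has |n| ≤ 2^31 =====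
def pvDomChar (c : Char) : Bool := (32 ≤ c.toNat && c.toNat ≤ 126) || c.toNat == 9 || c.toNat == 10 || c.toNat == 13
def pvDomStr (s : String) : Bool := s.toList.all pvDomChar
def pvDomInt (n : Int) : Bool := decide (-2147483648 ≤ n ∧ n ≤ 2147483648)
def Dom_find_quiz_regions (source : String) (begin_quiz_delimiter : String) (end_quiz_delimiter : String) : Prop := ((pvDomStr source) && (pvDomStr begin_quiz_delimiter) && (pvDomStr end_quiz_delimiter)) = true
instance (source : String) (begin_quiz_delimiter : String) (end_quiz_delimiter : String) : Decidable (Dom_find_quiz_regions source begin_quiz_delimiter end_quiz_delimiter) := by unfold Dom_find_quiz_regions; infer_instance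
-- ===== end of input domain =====

-- B replaces A's flat loop with an in_quiz_region flag by an outer loop whose begin-branch
-- consumes the quiz body with an inner scan (different decomposition; same cost).
-- Both programs raise RuntimeError on ill-nested delimiters; Pre_ admits exactly the inputs
-- where A returns normally (alternating begin/end delimiter lines, properly closed).

-- ===== PORT A =====
-- source.split("\n"): sep is the non-empty literal "\n", so PySem.Str.split? is always some.
def pvLines (s : String) : List String := (PySem.Str.split? s "\n").getD []

-- s.removeprefix(p): hand-ported (not in PySem); exact — drop the prefix's code points when it is a prefix.
def pvRemoveprefix (s p : String) : String :=
  if PySem.Str.startswith s p then String.ofList (s.toList.drop p.toList.length) else s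

-- state: (quizzes, remaining_lines, quiz_options, quiz_lines, in_quiz_region); none = raised
def stepA (bq ed : String)
    (st : (List (String × List String)) × (List String) × String × (List String) × Bool)
    (line : String) :
    Option ((List (String × List String)) × (List String) × String × (List String) × Bool) :=
  let s := PySem.Str.strip line
  match st with
  | (qz, rem, opts, ql, inQ) =>
    if PySem.Str.startswith s bq then
      if inQ then none
      else some (qz, rem, pvRemoveprefix s bq, [], true)
    else if PySem.Str.startswith s ed then
      if inQ then some (qz ++ [(opts, ql)], rem, opts, ql, false)
      else none
    else if inQ then some (qz, rem, opts, ql ++ [line], true)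
    else some (qz, rem ++ [line], opts, ql, false)

def find_quiz_regions (source : String) (begin_quiz_delimiter : String) (end_quiz_delimiter : String) : (List (String × List String)) × List String :=
  match (pvLines source).foldl
      (fun acc line => acc.bind (fun st => stepA begin_quiz_delimiter end_quiz_delimiter st line))
      (some ([], [], "", [], false)) with
  | none => ([], [])                                   -- raised inside the loop (outside Pre_)
  | some (qz, rem, _, _, inQ) =>
    if inQ = true then ([], []) else (qz, rem)                -- raise "Cell ended without …" (outside Pre_)

-- ===== PORT B =====
-- inner loop: consume lines until the end delimiter; none = raised (nested begin / ran out)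
def pvScanQuiz (bq ed : String) (acc : List String) :
    List String → Option (List String × List String)
  | [] => none
  | l :: rest =>
    let t := PySem.Str.strip l
    if PySem.Str.startswith t bq then none
    else if PySem.Str.startswith t ed then some (acc, rest)
    else pvScanQuiz bq ed (acc ++ [l]) rest

theorem pvScanQuiz_length (bq ed : String) :
    ∀ (ls acc body rest : List String),
      pvScanQuiz bq ed acc ls = some (body, rest) → rest.length < ls.length := by
  intro ls
  induction ls with
  | nil => intro acc body rest h; simp [pvScanQuiz] at h
  | cons l tl ih =>
    intro acc body rest h
    simp only [pvScanQuiz] at h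
    by_cases h1 : PySem.Str.startswith (PySem.Str.strip l) bq = true
    · rw [if_pos h1] at h; exact absurd h (by simp)
    · rw [if_neg h1] at h
      by_cases h2 : PySem.Str.startswith (PySem.Str.strip l) ed = true
      · rw [if_pos h2] at h
        simp only [Option.some.injEq, Prod.mk.injEq] at h
        simp [← h.2]
      · rw [if_neg h2] at h
        exact Nat.lt_trans (ih _ _ _ h) (Nat.lt_succ_self _)

def pvCollect (bq ed : String) : List String → Option ((List (String × List String)) × List String)
  | [] => some ([], [])
  | l :: rest =>
    let s := PySem.Str.strip l
    if PySem.Str.startswith s bq then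
      match h : pvScanQuiz bq ed [] rest with
      | none => none
      | some (body, rest') =>
        (pvCollect bq ed rest').map (fun pr => ((pvRemoveprefix s bq, body) :: pr.1, pr.2))
    else if PySem.Str.startswith s ed then none
    else (pvCollect bq ed rest).map (fun pr => (pr.1, l :: pr.2))
termination_by ls => ls.length
decreasing_by
  · exact Nat.lt_trans (pvScanQuiz_length bq ed rest [] body rest' h) (Nat.lt_succ_self _)
  · simp

def find_quiz_regions_alt (source : String) (begin_quiz_delimiter : String) (end_quiz_delimiter : String) : (List (String × List String)) × List String :=
  (pvCollect begin_quiz_delimiter end_quiz_delimiter (pvLines source)).getD ([], [])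

-- ===== PRECONDITION & SPEC =====
-- classify a line: some true = begin-delimiter line, some false = end-delimiter line (begin wins)
def pvMark (bq ed l : String) : Option Bool :=
  let s := PySem.Str.strip l
  if PySem.Str.startswith s bq then some true
  else if PySem.Str.startswith s ed then some false
  else none

-- the delimiter lines alternate begin, end, begin, end, …, end (properly closed)
def pvAlt : List Bool → Bool
  | [] => true
  | true :: false :: r => pvAlt r
  | _ => false

-- Pre_ excludes exactly the inputs on which A raises RuntimeError (end without beginning,
-- nested begin, or a region left open at the end of the cell); B raises there too.
def Pre_find_quiz_regions (source : String) (begin_quiz_delimiter : String) (end_quiz_delimiter : String) : Prop :=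
  pvAlt ((pvLines source).filterMap (pvMark begin_quiz_delimiter end_quiz_delimiter)) = true

instance (source : String) (begin_quiz_delimiter : String) (end_quiz_delimiter : String) : Decidable (Pre_find_quiz_regions source begin_quiz_delimiter end_quiz_delimiter) := by unfold Pre_find_quiz_regions; infer_instance

def pvWitness_find_quiz_regions : String × String × String :=
  ("a\n#### Quiz x\nq1\n#### End Quiz\nb", "#### Quiz", "#### End Quiz")

def Spec_find_quiz_regions (source : String) (begin_quiz_delimiter : String) (end_quiz_delimiter : String) (out : (List (String × List String)) × List String) : Prop := out = find_quiz_regions_alt source begin_quiz_delimiter end_quiz_delimiter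
instance (source : String) (begin_quiz_delimiter : String) (end_quiz_delimiter : String) (out : (List (String × List String)) × List String) : Decidable (Spec_find_quiz_regions source begin_quiz_delimiter end_quiz_delimiter out) := by unfold Spec_find_quiz_regions; infer_instance

-- ===== CLAIM (what is proved, stated in full; the proofs are below) =====
def Claim_equal_find_quiz_regions : Prop := ∀ (source : String) (begin_quiz_delimiter : String) (end_quiz_delimiter : String), Dom_find_quiz_regions source begin_quiz_delimiter end_quiz_delimiter → Pre_find_quiz_regions source begin_quiz_delimiter end_quiz_delimiter → Spec_find_quiz_regions source begin_quiz_delimiter end_quiz_delimiter (find_quiz_regions source begin_quiz_delimiter end_quiz_delimiter)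

-- ===== LEMMAS AND PROOFS =====

-- shape of the mark list while inside a region: an end mark, then alternation
def pvAltE : List Bool → Bool
  | false :: r => pvAlt r
  | _ => false

theorem pvAlt_cons_true (m : List Bool) : pvAlt (true :: m) = pvAltE m := by
  match m with
  | [] => rfl
  | false :: r => rfl
  | true :: r => rfl

theorem pvAlt_cons_false (m : List Bool) : pvAlt (false :: m) = false := by
  match m with
  | [] => rfl
  | false :: r => rfl
  | true :: r => rfl

theorem pvMark_begin (bq ed l : String)
    (h1 : PySem.Str.startswith (PySem.Str.strip l) bq = true) :
    pvMark bq ed l = some true := by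
  simp only [pvMark]; rw [if_pos h1]

theorem pvMark_end (bq ed l : String)
    (h1 : ¬ PySem.Str.startswith (PySem.Str.strip l) bq = true)
    (h2 : PySem.Str.startswith (PySem.Str.strip l) ed = true) :
    pvMark bq ed l = some false := by
  simp only [pvMark]; rw [if_neg h1, if_pos h2]

theorem pvMark_none (bq ed l : String)
    (h1 : ¬ PySem.Str.startswith (PySem.Str.strip l) bq = true)
    (h2 : ¬ PySem.Str.startswith (PySem.Str.strip l) ed = true) :
    pvMark bq ed l = none := by
  simp only [pvMark]; rw [if_neg h1, if_neg h2]

theorem stepA_begin (bq ed line : String) (qz : List (String × List String))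
    (rem : List String) (opts : String) (ql : List String)
    (h1 : PySem.Str.startswith (PySem.Str.strip line) bq = true) :
    stepA bq ed (qz, rem, opts, ql, false) line
      = some (qz, rem, pvRemoveprefix (PySem.Str.strip line) bq, [], true) := by
  simp only [stepA]; rw [if_pos h1]; rfl

theorem stepA_end_in (bq ed line : String) (qz : List (String × List String))
    (rem : List String) (opts : String) (ql : List String)
    (h1 : ¬ PySem.Str.startswith (PySem.Str.strip line) bq = true)
    (h2 : PySem.Str.startswith (PySem.Str.strip line) ed = true) :
    stepA bq ed (qz, rem, opts, ql, true) line
      = some (qz ++ [(opts, ql)], rem, opts, ql, false) := by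
  simp only [stepA]; rw [if_neg h1, if_pos h2]; rfl

theorem stepA_other_in (bq ed line : String) (qz : List (String × List String))
    (rem : List String) (opts : String) (ql : List String)
    (h1 : ¬ PySem.Str.startswith (PySem.Str.strip line) bq = true)
    (h2 : ¬ PySem.Str.startswith (PySem.Str.strip line) ed = true) :
    stepA bq ed (qz, rem, opts, ql, true) line
      = some (qz, rem, opts, ql ++ [line], true) := by
  simp only [stepA]; rw [if_neg h1, if_neg h2]; rfl

theorem stepA_other_out (bq ed line : String) (qz : List (String × List String))
    (rem : List String) (opts : String) (ql : List String)
    (h1 : ¬ PySem.Str.startswith (PySem.Str.strip line) bq = true)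
    (h2 : ¬ PySem.Str.startswith (PySem.Str.strip line) ed = true) :
    stepA bq ed (qz, rem, opts, ql, false) line
      = some (qz, rem ++ [line], opts, ql, false) := by
  simp only [stepA]; rw [if_neg h1, if_neg h2]; rfl

-- inside a region: A's fold over the lines up to the end delimiter equals
-- the state B's inner scan leaves behind
theorem pvInRegion (bq ed : String) :
    ∀ (ls acc : List String),
      pvAltE (ls.filterMap (pvMark bq ed)) = true →
      ∃ body rest, pvScanQuiz bq ed acc ls = some (body, rest) ∧
        pvAlt (rest.filterMap (pvMark bq ed)) = true ∧
        ∀ qz rem opts,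
          List.foldl (fun a line => a.bind (fun st => stepA bq ed st line))
              (some (qz, rem, opts, acc, true)) ls
          = List.foldl (fun a line => a.bind (fun st => stepA bq ed st line))
              (some (qz ++ [(opts, body)], rem, opts, body, false)) rest := by
  intro ls
  induction ls with
  | nil => intro acc h; simp [pvAltE] at h
  | cons l tl ih =>
    intro acc h
    by_cases h1 : PySem.Str.startswith (PySem.Str.strip l) bq = true
    · rw [List.filterMap_cons, pvMark_begin bq ed l h1] at h
      simp [pvAltE] at h
    · by_cases h2 : PySem.Str.startswith (PySem.Str.strip l) ed = true
      · rw [List.filterMap_cons, pvMark_end bq ed l h1 h2] at h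
        simp only [pvAltE] at h
        refine ⟨acc, tl, ?_, h, ?_⟩
        · simp only [pvScanQuiz]; rw [if_neg h1, if_pos h2]
        · intro qz rem opts
          simp only [List.foldl_cons, Option.bind_some, stepA_end_in bq ed l qz rem opts acc h1 h2]
      · rw [List.filterMap_cons, pvMark_none bq ed l h1 h2] at h
        obtain ⟨body, rest, hscan, halt, hfold⟩ := ih (acc ++ [l]) h
        refine ⟨body, rest, ?_, halt, ?_⟩
        · simp only [pvScanQuiz]; rw [if_neg h1, if_neg h2]; exact hscan
        · intro qz rem opts
          calc List.foldl (fun a line => a.bind (fun st => stepA bq ed st line))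
                  (some (qz, rem, opts, acc, true)) (l :: tl)
              = List.foldl (fun a line => a.bind (fun st => stepA bq ed st line))
                  (some (qz, rem, opts, acc ++ [l], true)) tl := by
                simp only [List.foldl_cons, Option.bind_some,
                  stepA_other_in bq ed l qz rem opts acc h1 h2]
            _ = _ := hfold qz rem opts

-- outside any region: A's fold equals B's recursion, up to the trailing state fields
theorem pvOutRegion (bq ed : String) :
    ∀ (n : Nat) (ls : List String), ls.length ≤ n →
      pvAlt (ls.filterMap (pvMark bq ed)) = true →
      ∃ res, pvCollect bq ed ls = some res ∧
        ∀ qz rem opts ql, ∃ opts' ql',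
          List.foldl (fun a line => a.bind (fun st => stepA bq ed st line))
              (some (qz, rem, opts, ql, false)) ls
          = some (qz ++ res.1, rem ++ res.2, opts', ql', false) := by
  intro n
  induction n with
  | zero =>
    intro ls hlen _
    have : ls = [] := List.eq_nil_of_length_eq_zero (Nat.le_zero.mp hlen)
    subst this
    exact ⟨([], []), by rw [pvCollect], fun qz rem opts ql => ⟨opts, ql, by simp⟩⟩
  | succ n ih =>
    intro ls hlen halt
    match ls with
    | [] => exact ⟨([], []), by rw [pvCollect], fun qz rem opts ql => ⟨opts, ql, by simp⟩⟩
    | l :: tl =>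
      have htl : tl.length ≤ n := by simpa using Nat.succ_le_succ_iff.mp hlen
      by_cases h1 : PySem.Str.startswith (PySem.Str.strip l) bq = true
      · rw [List.filterMap_cons, pvMark_begin bq ed l h1, pvAlt_cons_true] at halt
        obtain ⟨body, rest, hscan, haltrest, hfold2⟩ := pvInRegion bq ed tl [] halt
        have hrest : rest.length ≤ n :=
          Nat.le_of_lt (Nat.lt_of_lt_of_le (pvScanQuiz_length bq ed tl [] body rest hscan) htl)
        obtain ⟨res', hcoll, hfold'⟩ := ih rest hrest haltrest
        refine ⟨((pvRemoveprefix (PySem.Str.strip l) bq, body) :: res'.1, res'.2), ?_, ?_⟩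
        · rw [pvCollect, if_pos h1]
          split
          next heq => rw [hscan] at heq; exact absurd heq (by simp)
          next b' r' heq =>
            rw [hscan] at heq
            obtain ⟨hb, hr⟩ : body = b' ∧ rest = r' := by simpa using heq
            subst hb; subst hr
            rw [hcoll]
            rfl
        · intro qz rem opts ql
          obtain ⟨opts', ql', hf⟩ := hfold' (qz ++ [(pvRemoveprefix (PySem.Str.strip l) bq, body)]) rem (pvRemoveprefix (PySem.Str.strip l) bq) body
          refine ⟨opts', ql', ?_⟩
          calc List.foldl (fun a line => a.bind (fun st => stepA bq ed st line))
                  (some (qz, rem, opts, ql, false)) (l :: tl)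
              = List.foldl (fun a line => a.bind (fun st => stepA bq ed st line))
                  (some (qz, rem, pvRemoveprefix (PySem.Str.strip l) bq, [], true)) tl := by
                simp only [List.foldl_cons, Option.bind_some, stepA_begin bq ed l qz rem opts ql h1]
            _ = List.foldl (fun a line => a.bind (fun st => stepA bq ed st line))
                  (some (qz ++ [(pvRemoveprefix (PySem.Str.strip l) bq, body)], rem,
                    pvRemoveprefix (PySem.Str.strip l) bq, body, false)) rest :=
                hfold2 qz rem (pvRemoveprefix (PySem.Str.strip l) bq)
            _ = some (qz ++ [(pvRemoveprefix (PySem.Str.strip l) bq, body)] ++ res'.1,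
                  rem ++ res'.2, opts', ql', false) := hf
            _ = some (qz ++ ((pvRemoveprefix (PySem.Str.strip l) bq, body) :: res'.1),
                  rem ++ res'.2, opts', ql', false) := by simp
      · by_cases h2 : PySem.Str.startswith (PySem.Str.strip l) ed = true
        · rw [List.filterMap_cons, pvMark_end bq ed l h1 h2, pvAlt_cons_false] at halt
          exact absurd halt (by simp)
        · rw [List.filterMap_cons, pvMark_none bq ed l h1 h2] at halt
          obtain ⟨res', hcoll, hfold'⟩ := ih tl htl halt
          refine ⟨(res'.1, l :: res'.2), ?_, ?_⟩
          · rw [pvCollect]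
            rw [if_neg h1, if_neg h2]
            simp only [hcoll, Option.map_some]
          · intro qz rem opts ql
            obtain ⟨opts', ql', hf⟩ := hfold' qz (rem ++ [l]) opts ql
            refine ⟨opts', ql', ?_⟩
            calc List.foldl (fun a line => a.bind (fun st => stepA bq ed st line))
                    (some (qz, rem, opts, ql, false)) (l :: tl)
                = List.foldl (fun a line => a.bind (fun st => stepA bq ed st line))
                    (some (qz, rem ++ [l], opts, ql, false)) tl := by
                  simp only [List.foldl_cons, Option.bind_some,
                    stepA_other_out bq ed l qz rem opts ql h1 h2]
              _ = some (qz ++ res'.1, rem ++ [l] ++ res'.2, opts', ql', false) := hf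
              _ = some (qz ++ res'.1, rem ++ (l :: res'.2), opts', ql', false) := by simp

-- ===== VERDICT (by name: the statement is the Claim_ definition above) =====
theorem find_quiz_regions_spec : Claim_equal_find_quiz_regions := by
  intro source bq ed _ hpre
  unfold Spec_find_quiz_regions find_quiz_regions find_quiz_regions_alt
  obtain ⟨res, hcoll, hfold⟩ :=
    pvOutRegion bq ed (pvLines source).length (pvLines source) le_rfl hpre
  obtain ⟨opts', ql', hf⟩ := hfold [] [] "" []
  simp only [List.nil_append] at hf
  rw [hf, hcoll]
  simp
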